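-- pv_equiv track=rewrite | github.com/vinithbraj/openfabric | agent_library/reduction.py | _progressive_row_samples
-- ===== SOURCE A (Python) =====
-- from typing import Any
--
-- def _progressive_row_samples(rows: list[dict[str, Any]]) -> list[list[dict[str, Any]]]:
--     if not rows:
--         return [[]]
--     limits = (10, 25, 50)
--     samples: list[list[dict[str, Any]]] = []
--     for limit in limits:
--         sample = rows[:limit]
--         if sample and sample not in samples:
--             samples.append(sample)
--         if len(rows) <= limit:
--             break
--     if rows not in samples and len(rows) <= 50:
--         samples.append(rows)
--     return samples or [[]]
-- ===== SOURCE B (Python) =====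
-- def _progressive_row_samples(rows):
--     n = len(rows)
--     if n <= 10:
--         return [rows]
--     if n <= 25:
--         return [rows[:10], rows]
--     if n <= 50:
--         return [rows[:10], rows[:25], rows]
--     return [rows[:10], rows[:25], rows[:50]]
-- ===== Notes on version B (the rewrite author's own statement) =====
-- stated objective: simpler
-- what changed: B replaces A's accumulate-and-deduplicate loop with break plus final membership patch-up by a closed-form four-way case table on len(rows) that directly returns the list of prefixes (the empty-input [[]] falls out of the n<=10 case as [rows]).
import Mathlib
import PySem

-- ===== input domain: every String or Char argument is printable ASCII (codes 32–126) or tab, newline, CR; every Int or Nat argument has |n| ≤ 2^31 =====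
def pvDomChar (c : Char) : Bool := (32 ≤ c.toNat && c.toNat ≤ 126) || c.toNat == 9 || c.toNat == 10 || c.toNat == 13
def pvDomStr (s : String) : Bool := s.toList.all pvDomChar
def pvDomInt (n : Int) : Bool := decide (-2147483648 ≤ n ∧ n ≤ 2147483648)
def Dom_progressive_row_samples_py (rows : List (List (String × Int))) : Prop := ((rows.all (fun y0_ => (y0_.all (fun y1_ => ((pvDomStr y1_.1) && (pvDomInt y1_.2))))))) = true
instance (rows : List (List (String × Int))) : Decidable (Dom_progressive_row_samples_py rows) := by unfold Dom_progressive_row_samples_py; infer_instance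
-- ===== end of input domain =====

-- B replaces A's accumulate/deduplicate loop with break and final membership patch-up by
-- a closed-form four-way case table on len(rows) returning the prefixes directly (simpler).

-- ===== PORT A =====
-- the for-loop over limits with its early break
def pvALoop (rows : List (List (String × Int))) : List Int → List (List (List (String × Int))) → List (List (List (String × Int)))
  | [], samples => samples
  | limit :: rest, samples =>
    let sample := PySem.List.slice rows none (some limit)
    let samples' := if sample ≠ [] ∧ sample ∉ samples then samples ++ [sample] else samples
    if (rows.length : Int) ≤ limit then samples' else pvALoop rows rest samples'

def progressive_row_samples_py (rows : List (List (String × Int))) : List (List (List (String × Int))) :=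
  if rows = [] then [[]] else
  let samples := pvALoop rows [10, 25, 50] []
  let samples := if rows ∉ samples ∧ (rows.length : Int) ≤ 50 then samples ++ [rows] else samples
  if samples = [] then [[]] else samples

-- ===== PORT B =====
def progressive_row_samples_py_alt (rows : List (List (String × Int))) : List (List (List (String × Int))) :=
  let n : Int := rows.length
  if n ≤ 10 then [rows]
  else if n ≤ 25 then [PySem.List.slice rows none (some 10), rows]
  else if n ≤ 50 then [PySem.List.slice rows none (some 10), PySem.List.slice rows none (some 25), rows]
  else [PySem.List.slice rows none (some 10), PySem.List.slice rows none (some 25), PySem.List.slice rows none (some 50)]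

-- ===== PRECONDITION & SPEC =====
def Spec_progressive_row_samples_py (rows : List (List (String × Int))) (out : List (List (List (String × Int)))) : Prop := out = progressive_row_samples_py_alt rows
instance (rows : List (List (String × Int))) (out : List (List (List (String × Int)))) : Decidable (Spec_progressive_row_samples_py rows out) := by unfold Spec_progressive_row_samples_py; infer_instance

-- ===== CLAIM (what is proved, stated in full; the proofs are below) =====
def Claim_equal_progressive_row_samples_py : Prop := ∀ (rows : List (List (String × Int))), Dom_progressive_row_samples_py rows → Spec_progressive_row_samples_py rows (progressive_row_samples_py rows)

-- ===== LEMMAS AND PROOFS =====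

theorem take_len_ne (rows : List (List (String × Int))) (a b : Nat)
    (h : min a rows.length ≠ min b rows.length) : rows.take a ≠ rows.take b := by
  intro e
  have := congrArg List.length e
  simp only [List.length_take] at this
  omega

theorem main_lemma (rows : List (List (String × Int))) :
    progressive_row_samples_py rows = progressive_row_samples_py_alt rows := by
  by_cases h0 : rows = []
  · subst h0; rfl
  have hlen : 0 < rows.length := List.length_pos_of_ne_nil h0
  have s10 : PySem.List.slice rows none (some (10:Int)) = rows.take 10 := by
    simpa using PySem.List.slice_to_natCast rows 10
  have s25 : PySem.List.slice rows none (some (25:Int)) = rows.take 25 := by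
    simpa using PySem.List.slice_to_natCast rows 25
  have s50 : PySem.List.slice rows none (some (50:Int)) = rows.take 50 := by
    simpa using PySem.List.slice_to_natCast rows 50
  have t10ne : rows.take 10 ≠ [] := by
    simp [List.take_eq_nil_iff, h0]
  have t25ne : rows.take 25 ≠ [] := by
    simp [List.take_eq_nil_iff, h0]
  have t50ne : rows.take 50 ≠ [] := by
    simp [List.take_eq_nil_iff, h0]
  unfold progressive_row_samples_py progressive_row_samples_py_alt
  simp only [if_neg h0]
  by_cases h10 : rows.length ≤ 10
  · -- n ≤ 10 : result is [rows]
    have e10 : rows.take 10 = rows := List.take_of_length_le h10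
    have g10 : ((rows.length : Int) ≤ 10) := by omega
    simp [pvALoop, s10, e10, h0, g10]
  · by_cases h25 : rows.length ≤ 25
    · -- 10 < n ≤ 25 : result is [take 10, rows]
      have e25 : rows.take 25 = rows := List.take_of_length_le h25
      have hne : rows ≠ rows.take 10 := by
        intro e; have := congrArg List.length e; simp only [List.length_take] at this; omega
      have g25 : ((rows.length : Int) ≤ 25) := by omega
      have f10' : ¬((rows.length : Int) ≤ 10) := by omega
      simp [pvALoop, s10, s25, e25, h0, t10ne, hne, g25, f10']
    · by_cases h50 : rows.length ≤ 50
      · -- 25 < n ≤ 50 : result is [take 10, take 25, rows]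
        have e50 : rows.take 50 = rows := List.take_of_length_le h50
        have d2510 : rows.take 25 ≠ rows.take 10 := take_len_ne rows 25 10 (by omega)
        have hne10 : rows ≠ rows.take 10 := by
          intro e; have := congrArg List.length e; simp only [List.length_take] at this; omega
        have hne25 : rows ≠ rows.take 25 := by
          intro e; have := congrArg List.length e; simp only [List.length_take] at this; omega
        have g50 : ((rows.length : Int) ≤ 50) := by omega
        have f10' : ¬((rows.length : Int) ≤ 10) := by omega
        have f25' : ¬((rows.length : Int) ≤ 25) := by omega
        simp [pvALoop, s10, s25, s50, e50, h0, t10ne, t25ne, d2510, hne10, hne25, g50, f10', f25']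
      · -- n > 50 : result is [take 10, take 25, take 50]
        have d2510 : rows.take 25 ≠ rows.take 10 := take_len_ne rows 25 10 (by omega)
        have d5010 : rows.take 50 ≠ rows.take 10 := take_len_ne rows 50 10 (by omega)
        have d5025 : rows.take 50 ≠ rows.take 25 := take_len_ne rows 50 25 (by omega)
        have f10' : ¬((rows.length : Int) ≤ 10) := by omega
        have f25' : ¬((rows.length : Int) ≤ 25) := by omega
        have f50' : ¬((rows.length : Int) ≤ 50) := by omega
        simp [pvALoop, s10, s25, s50, h0, t10ne, t25ne, t50ne, d2510, d5010, d5025, f10', f25', f50']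

-- ===== VERDICT (by name: the statement is the Claim_ definition above) =====
theorem progressive_row_samples_py_spec : Claim_equal_progressive_row_samples_py := by
  intro rows _
  exact main_lemma rows
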